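-- pv_equiv track=rewrite | github.com/vydevyatnikov/Web_Scraping_Elections_Results | Web Scraping Elections Functions.py | gener
-- ===== SOURCE A (Python) =====
-- def gener(start_point, end_point, omit):  # generates numbers from start_point to end_point including the end_point
--     temp = start_point
--     while temp <= end_point:
--         if temp in omit:
--             temp += 1
--             continue
--         else:
--             yield temp
--             temp += 1
-- ===== SOURCE B (Python) =====
-- def gener(start_point, end_point, omit):
--     # build the whole complement at once, then emit it in ascending order
--     yield from sorted(set(range(start_point, end_point + 1)) - set(omit))
-- ===== Notes on version B (the rewrite author's own statement) =====
-- stated objective: idiomatic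
-- what changed: Replaces the one-at-a-time while-loop with per-element list membership scans by a bulk set difference (set(range(start,end+1)) - set(omit)) followed by sorted() to emit the ascending order.
import Mathlib
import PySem

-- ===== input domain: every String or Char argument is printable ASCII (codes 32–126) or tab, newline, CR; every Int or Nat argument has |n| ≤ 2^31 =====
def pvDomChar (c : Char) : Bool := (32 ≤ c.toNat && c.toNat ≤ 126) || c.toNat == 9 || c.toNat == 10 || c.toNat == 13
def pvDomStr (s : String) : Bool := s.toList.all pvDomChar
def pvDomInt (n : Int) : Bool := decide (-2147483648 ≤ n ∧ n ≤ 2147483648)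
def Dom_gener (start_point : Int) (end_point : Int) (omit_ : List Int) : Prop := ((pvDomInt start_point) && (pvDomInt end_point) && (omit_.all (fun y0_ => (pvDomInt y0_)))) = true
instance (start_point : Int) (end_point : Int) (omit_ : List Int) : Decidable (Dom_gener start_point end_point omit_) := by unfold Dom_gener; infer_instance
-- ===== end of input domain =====

-- ===== PORT A =====
-- B changes: bulk set difference + sorted instead of the incremental membership-scan loop (idiomatic rewrite, same return value).
-- while temp <= end_point: …  — fuel (end_point+1-temp).toNat counts exactly the remaining iterations
def generGo (omit_ : List Int) (end_point : Int) : Nat → Int → List Int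
  | 0, _ => []
  | Nat.succ f, temp =>
      if omit_.contains temp then generGo omit_ end_point f (temp + 1)
      else temp :: generGo omit_ end_point f (temp + 1)

def gener (start_point : Int) (end_point : Int) (omit_ : List Int) : List Int :=
  generGo omit_ end_point (end_point + 1 - start_point).toNat start_point

-- ===== PORT B =====
def gener_alt (start_point : Int) (end_point : Int) (omit_ : List Int) : List Int :=
  PySem.List.sorted
    (PySem.Set.diff (PySem.Set.ofList (PySem.List.pyRange start_point (end_point + 1) 1))
      (PySem.Set.ofList omit_))
    (fun x => x) false

-- ===== PRECONDITION & SPEC =====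
def Spec_gener (start_point : Int) (end_point : Int) (omit_ : List Int) (out : List Int) : Prop := out = gener_alt start_point end_point omit_
instance (start_point : Int) (end_point : Int) (omit_ : List Int) (out : List Int) : Decidable (Spec_gener start_point end_point omit_ out) := by unfold Spec_gener; infer_instance

-- ===== CLAIM (what is proved, stated in full; the proofs are below) =====
def Claim_equal_gener : Prop := ∀ (start_point : Int) (end_point : Int) (omit_ : List Int), Dom_gener start_point end_point omit_ → Spec_gener start_point end_point omit_ (gener start_point end_point omit_)

-- ===== LEMMAS AND PROOFS =====

lemma generGo_eq_filter (omit_ : List Int) (e : Int) (fuel : Nat) (t : Int)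
    (h : fuel = (e + 1 - t).toNat) :
    generGo omit_ e fuel t
      = (PySem.List.pyRange t (e + 1) 1).filter (fun x => !omit_.contains x) := by
  induction fuel generalizing t with
  | zero =>
      have : e + 1 ≤ t := by omega
      simp [generGo, PySem.List.pyRange_one_eq_nil this]
  | succ f ih =>
      have ht : t < e + 1 := by omega
      rw [PySem.List.pyRange_one_cons ht]
      have := ih (t + 1) (by omega)
      by_cases hm : t ∈ omit_
      · simp [generGo, hm, this]
      · simp [generGo, hm, this]

lemma alt_eq_filter (s e : Int) (omit_ : List Int) :
    gener_alt s e omit_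
      = (PySem.List.pyRange s (e + 1) 1).filter (fun x => !omit_.contains x) := by
  unfold gener_alt
  have hR : PySem.Set.ofList (PySem.List.pyRange s (e + 1) 1)
      = PySem.List.pyRange s (e + 1) 1 :=
    PySem.Set.ofList_eq_self_of_nodup _ (PySem.List.nodup_pyRange_one s (e + 1))
  rw [hR]
  have hdiff : PySem.Set.diff (PySem.List.pyRange s (e + 1) 1) (PySem.Set.ofList omit_)
      = (PySem.List.pyRange s (e + 1) 1).filter (fun x => !omit_.contains x) := by
    simp [PySem.Set.diff, PySem.Set.contains]
  rw [hdiff]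
  apply PySem.List.sorted_eq_self_of_pairwise
  have := PySem.List.pairwise_lt_pyRange_one (a := s) (b := e + 1)
  exact (this.filter _).imp (fun h => le_of_lt h)

-- ===== VERDICT (by name: the statement is the Claim_ definition above) =====
theorem gener_spec : Claim_equal_gener := by
  intro s e omit_ _
  unfold Spec_gener gener
  rw [generGo_eq_filter omit_ e _ s rfl, alt_eq_filter]
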